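-- pv_equiv track=rewrite | github.com/iddodi33/sportstech-digest | newsletter_export.py | _build_jobs_section
-- ===== SOURCE A (Python) =====
-- from collections import defaultdict
--
-- SENIORITY_ORDER = ["Executive", "Lead", "Senior", "Mid-level", "Junior", "Other"]
--
-- def _build_jobs_section(jobs: list[dict]) -> str:
--     lines = ["## Open jobs (approved, seen in last 8 days)", ""]
--
--     if not jobs:
--         lines.append("_No approved jobs seen in the last 8 days._")
--         lines.append("")
--         return "\n".join(lines)
--
--     by_seniority: dict[str, list] = defaultdict(list)
--     for job in jobs:
--         seniority = job.get("seniority") or "Other"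
--         by_seniority[seniority].append(job)
--
--     present = [s for s in SENIORITY_ORDER if s in by_seniority]
--     remaining = sorted(set(by_seniority.keys()) - set(SENIORITY_ORDER))
--     all_levels = present + remaining
--
--     for seniority in all_levels:
--         level_jobs = by_seniority[seniority]
--         lines.append(f"### {seniority} ({len(level_jobs)})")
--         lines.append("")
--
--         by_company: dict[str, list] = defaultdict(list)
--         for job in level_jobs:
--             company = job.get("company_name") or "Unknown"
--             by_company[company].append(job)
--
--         for company in sorted(by_company.keys()):
--             company_jobs = by_company[company]
--             lines.append(f"**{company}** ({len(company_jobs)})")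
--             for job in company_jobs:
--                 title = job.get("title") or "Untitled"
--                 url = job.get("url") or ""
--                 location = job.get("location_normalised") or ""
--                 remote = job.get("remote_status") or ""
--                 fn = job.get("job_function") or ""
--                 detail_parts = [p for p in [location, remote, fn] if p]
--                 detail_str = " · ".join(detail_parts)
--                 job_line = f"- [{title}]({url})" if url else f"- {title}"
--                 if detail_str:
--                     job_line += f" — {detail_str}"
--                 lines.append(job_line)
--             lines.append("")
--
--     return "\n".join(lines)
-- ===== SOURCE B (Python) =====
-- SENIORITY_ORDER = ["Executive", "Lead", "Senior", "Mid-level", "Junior", "Other"]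
--
--
-- def _sen(job):
--     return job.get("seniority") or "Other"
--
--
-- def _comp(job):
--     return job.get("company_name") or "Unknown"
--
--
-- def _job_line(job):
--     title = job.get("title") or "Untitled"
--     url = job.get("url") or ""
--     details = " · ".join(p for p in (job.get("location_normalised") or "",
--                                      job.get("remote_status") or "",
--                                      job.get("job_function") or "") if p)
--     line = f"- [{title}]({url})" if url else f"- {title}"
--     return line + (f" — {details}" if details else "")
--
--
-- def _company_block(company, cjobs):
--     return [f"**{company}** ({len(cjobs)})"] + [_job_line(j) for j in cjobs] + [""]
--
--
-- def _level_block(level, ljobs):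
--     return [f"### {level} ({len(ljobs)})", ""] + [
--         line
--         for company in sorted({_comp(j) for j in ljobs})
--         for line in _company_block(company, [j for j in ljobs if _comp(j) == company])
--     ]
--
--
-- def _build_jobs_section(jobs):
--     head = ["## Open jobs (approved, seen in last 8 days)", ""]
--     if not jobs:
--         return "\n".join(head + ["_No approved jobs seen in the last 8 days._", ""])
--     sens = [_sen(j) for j in jobs]
--     levels = [s for s in SENIORITY_ORDER if s in sens] + sorted(set(sens) - set(SENIORITY_ORDER))
--     body = [line
--             for level in levels
--             for line in _level_block(level, [j for j in jobs if _sen(j) == level])]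
--     return "\n".join(head + body)
-- ===== Notes on version B (the rewrite author's own statement) =====
-- stated objective: simpler
-- what changed: Replaces A's two levels of defaultdict accumulation plus key-set arithmetic with a pure declarative decomposition: compute the level order once from the mapped seniorities, then build each level/company block by filtering and set-comprehension via small helper functions (no dicts, no mutation).
import Mathlib
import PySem

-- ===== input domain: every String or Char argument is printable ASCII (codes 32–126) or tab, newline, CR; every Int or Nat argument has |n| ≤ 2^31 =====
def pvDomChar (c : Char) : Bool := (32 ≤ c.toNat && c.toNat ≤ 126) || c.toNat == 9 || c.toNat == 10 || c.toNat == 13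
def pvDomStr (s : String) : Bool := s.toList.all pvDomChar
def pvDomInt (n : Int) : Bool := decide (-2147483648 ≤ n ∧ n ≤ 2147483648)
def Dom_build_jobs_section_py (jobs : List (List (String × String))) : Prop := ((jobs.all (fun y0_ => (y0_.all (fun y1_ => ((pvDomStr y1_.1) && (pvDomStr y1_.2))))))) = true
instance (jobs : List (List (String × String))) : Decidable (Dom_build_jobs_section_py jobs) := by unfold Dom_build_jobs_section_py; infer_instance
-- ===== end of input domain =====

-- B replaces A's defaultdict grouping passes with a pure filter/comprehension decomposition
-- (per-level and per-company blocks built by helper functions); objective: simpler/idiomatic, no speed claim.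

def SENIORITY_ORDER : List String := ["Executive", "Lead", "Senior", "Mid-level", "Junior", "Other"]

-- Python's `x or default` on an optional string (falsy = missing or empty); shared truthiness helper.
def pyOr (o : Option String) (d : String) : String :=
  match o with
  | none => d
  | some s => if s = "" then d else s

-- ===== PORT A =====
def build_jobs_section_py (jobs : List (List (String × String))) : String :=
  let lines : List String := ["## Open jobs (approved, seen in last 8 days)", ""]
  if jobs = [] then
    PySem.Str.join "\n" (lines ++ ["_No approved jobs seen in the last 8 days._", ""])
  else
    let bySeniority : PySem.Dict String (List (List (String × String))) :=
      jobs.foldl (fun d job =>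
        d.modify (pyOr ((PySem.Dict.mk job).get? "seniority") "Other") [] (· ++ [job]))
        PySem.Dict.empty
    let present := SENIORITY_ORDER.filter (fun s => bySeniority.contains s)
    let remaining := PySem.List.sorted
      (PySem.Set.diff (PySem.Set.ofList bySeniority.keys) (PySem.Set.ofList SENIORITY_ORDER))
      (fun x => x) false
    let allLevels := present ++ remaining
    let lines := allLevels.foldl (fun lines seniority =>
      let levelJobs := bySeniority.getD seniority []
      let lines := lines ++ ["### " ++ seniority ++ " (" ++ PySem.Int.toStr (levelJobs.length : Int) ++ ")", ""]
      let byCompany : PySem.Dict String (List (List (String × String))) :=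
        levelJobs.foldl (fun d job =>
          d.modify (pyOr ((PySem.Dict.mk job).get? "company_name") "Unknown") [] (· ++ [job]))
          PySem.Dict.empty
      (PySem.List.sorted byCompany.keys (fun x => x) false).foldl (fun lines company =>
        let companyJobs := byCompany.getD company []
        let lines := lines ++ ["**" ++ company ++ "** (" ++ PySem.Int.toStr (companyJobs.length : Int) ++ ")"]
        let lines := companyJobs.foldl (fun lines job =>
          let title := pyOr ((PySem.Dict.mk job).get? "title") "Untitled"
          let url := pyOr ((PySem.Dict.mk job).get? "url") ""
          let location := pyOr ((PySem.Dict.mk job).get? "location_normalised") ""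
          let remote := pyOr ((PySem.Dict.mk job).get? "remote_status") ""
          let fn := pyOr ((PySem.Dict.mk job).get? "job_function") ""
          let detailParts := [location, remote, fn].filter (· != "")
          let detailStr := PySem.Str.join " · " detailParts
          let jobLine := if url != "" then "- [" ++ title ++ "](" ++ url ++ ")" else "- " ++ title
          let jobLine := if detailStr != "" then jobLine ++ (" — " ++ detailStr) else jobLine
          lines ++ [jobLine]) lines
        lines ++ [""]) lines) lines
    PySem.Str.join "\n" lines

-- ===== PORT B =====
def pvSen (job : List (String × String)) : String :=
  pyOr ((PySem.Dict.mk job).get? "seniority") "Other"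

def pvComp (job : List (String × String)) : String :=
  pyOr ((PySem.Dict.mk job).get? "company_name") "Unknown"

def pvJobLine (job : List (String × String)) : String :=
  let title := pyOr ((PySem.Dict.mk job).get? "title") "Untitled"
  let url := pyOr ((PySem.Dict.mk job).get? "url") ""
  let details := PySem.Str.join " · "
    ([pyOr ((PySem.Dict.mk job).get? "location_normalised") "",
      pyOr ((PySem.Dict.mk job).get? "remote_status") "",
      pyOr ((PySem.Dict.mk job).get? "job_function") ""].filter (· != ""))
  let line := if url != "" then "- [" ++ title ++ "](" ++ url ++ ")" else "- " ++ title
  line ++ (if details != "" then " — " ++ details else "")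

def pvCompanyBlock (company : String) (cjobs : List (List (String × String))) : List String :=
  ["**" ++ company ++ "** (" ++ PySem.Int.toStr (cjobs.length : Int) ++ ")"] ++
    cjobs.map pvJobLine ++ [""]

def pvLevelBlock (level : String) (ljobs : List (List (String × String))) : List String :=
  ["### " ++ level ++ " (" ++ PySem.Int.toStr (ljobs.length : Int) ++ ")", ""] ++
    (PySem.List.sorted (PySem.Set.ofList (ljobs.map pvComp)) (fun x => x) false).flatMap
      (fun company => pvCompanyBlock company (ljobs.filter (fun j => pvComp j == company)))

def build_jobs_section_py_alt (jobs : List (List (String × String))) : String :=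
  let head : List String := ["## Open jobs (approved, seen in last 8 days)", ""]
  if jobs = [] then
    PySem.Str.join "\n" (head ++ ["_No approved jobs seen in the last 8 days._", ""])
  else
    let sens := jobs.map pvSen
    let levels := SENIORITY_ORDER.filter (fun s => sens.contains s) ++
      PySem.List.sorted (PySem.Set.diff (PySem.Set.ofList sens) (PySem.Set.ofList SENIORITY_ORDER))
        (fun x => x) false
    let body := levels.flatMap (fun level =>
      pvLevelBlock level (jobs.filter (fun j => pvSen j == level)))
    PySem.Str.join "\n" (head ++ body)

-- ===== PRECONDITION & SPEC =====
def Spec_build_jobs_section_py (jobs : List (List (String × String))) (out : String) : Prop := out = build_jobs_section_py_alt jobs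
instance (jobs : List (List (String × String))) (out : String) : Decidable (Spec_build_jobs_section_py jobs out) := by unfold Spec_build_jobs_section_py; infer_instance

-- ===== CLAIM (what is proved, stated in full; the proofs are below) =====
def Claim_equal_build_jobs_section_py : Prop := ∀ (jobs : List (List (String × String))), Dom_build_jobs_section_py jobs → Spec_build_jobs_section_py jobs (build_jobs_section_py jobs)

-- ===== LEMMAS AND PROOFS =====

-- A's defaultdict-append grouping looked up at a key is the filter of the list by that key.
theorem group_getD (key : List (String × String) → String)
    (jobs : List (List (String × String))) (c : String) :
    (jobs.foldl (fun d job => d.modify (key job) [] (· ++ [job])) PySem.Dict.empty).getD c []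
      = jobs.filter (fun j => key j == c) := by
  rw [show (jobs.foldl (fun d job => d.modify (key job) [] (· ++ [job])) PySem.Dict.empty)
        = ((jobs.map (fun j => (key j, j))).foldl (fun d p => d.modify p.1 [] (· ++ [p.2])) PySem.Dict.empty)
      from (List.foldl_map (f := fun j => (key j, j))
        (g := fun (d : PySem.Dict String (List (List (String × String)))) p => d.modify p.1 [] (· ++ [p.2]))
        (l := jobs) (init := PySem.Dict.empty)).symm]
  rw [PySem.Dict.getD_foldl_modify_append]
  simp [List.filter_map, Function.comp_def]

-- The keys of A's grouping dict, in insertion order, are the deduplicated mapped keys.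
theorem group_keys (key : List (String × String) → String)
    (jobs : List (List (String × String))) :
    (jobs.foldl (fun d job => d.modify (key job) [] (· ++ [job])) PySem.Dict.empty).keys
      = PySem.Set.ofList (jobs.map key) := by
  rw [PySem.Dict.keys_foldl_modify_key]
  rfl

theorem group_contains (key : List (String × String) → String)
    (jobs : List (List (String × String))) (s : String) :
    (jobs.foldl (fun d job => d.modify (key job) [] (· ++ [job])) PySem.Dict.empty).contains s
      = (jobs.map key).contains s := by
  rw [PySem.Dict.contains_eq_decide_mem_keys, group_keys]
  simp [PySem.Set.mem_ofList]

theorem pvSen_def : pvSen = fun job => pyOr ((PySem.Dict.mk job).get? "seniority") "Other" := rfl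
theorem pvComp_def : pvComp = fun job => pyOr ((PySem.Dict.mk job).get? "company_name") "Unknown" := rfl
theorem pvJobLine_def : pvJobLine = fun job =>
    (if (pyOr ((PySem.Dict.mk job).get? "url") "" != "") then
        "- [" ++ pyOr ((PySem.Dict.mk job).get? "title") "Untitled" ++ "](" ++
          pyOr ((PySem.Dict.mk job).get? "url") "" ++ ")"
      else "- " ++ pyOr ((PySem.Dict.mk job).get? "title") "Untitled") ++
    (if (PySem.Str.join " · "
          ([pyOr ((PySem.Dict.mk job).get? "location_normalised") "",
            pyOr ((PySem.Dict.mk job).get? "remote_status") "",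
            pyOr ((PySem.Dict.mk job).get? "job_function") ""].filter (· != "")) != "") then
        " — " ++ PySem.Str.join " · "
          ([pyOr ((PySem.Dict.mk job).get? "location_normalised") "",
            pyOr ((PySem.Dict.mk job).get? "remote_status") "",
            pyOr ((PySem.Dict.mk job).get? "job_function") ""].filter (· != ""))
      else "") := rfl

theorem append_ite_empty (s t : String) (b : Bool) :
    (if b then s ++ t else s) = s ++ (if b then t else "") := by
  cases b <;> simp

-- ===== VERDICT (by name: the statement is the Claim_ definition above) =====
theorem build_jobs_section_py_spec : Claim_equal_build_jobs_section_py := by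
  intro jobs _
  unfold Spec_build_jobs_section_py build_jobs_section_py build_jobs_section_py_alt
  by_cases h : jobs = []
  · simp [h]
  · simp only [if_neg h]
    congr 1
    simp only [PySem.List.foldl_append_singleton_eq_map, List.append_assoc,
      PySem.List.foldl_append_eq_flatMap, group_getD, group_keys, group_contains,
      PySem.Set.ofList_ofList, pvLevelBlock, pvCompanyBlock, pvSen_def, pvComp_def, pvJobLine_def,
      append_ite_empty]
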